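-- pv_equiv track=rewrite | github.com/PeaWagon/iodata | cif.py | iter_equiv_pos_terms
-- ===== SOURCE A (Python) =====
-- def iter_equiv_pos_terms(comp):
--     while len(comp) > 0:
--         sign = 1-2*(comp[0]=='-')
--         if comp[0] in '+-':
--             comp = comp[1:]
--         pos_p = comp.find('+')
--         pos_m = comp.find('-')
--         if pos_p < 0: pos_p += len(comp)+1
--         if pos_m < 0: pos_m += len(comp)+1
--         end = min(pos_p, pos_m)
--         yield sign, comp[:end]
--         comp = comp[end:]
-- ===== SOURCE B (Python) =====
-- def iter_equiv_pos_terms(comp):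
--     if not comp:
--         return
--     sign = -1 if comp[0] == '-' else 1
--     start = 1 if comp[0] in '+-' else 0
--     buf = []
--     for ch in comp[start:]:
--         if ch in '+-':
--             yield sign, ''.join(buf)
--             sign = -1 if ch == '-' else 1
--             buf = []
--         else:
--             buf.append(ch)
--     yield sign, ''.join(buf)
-- ===== Notes on version B (the rewrite author's own statement) =====
-- stated objective: simpler
-- what changed: Replaces A's while loop of repeated str.find scans for the next plus/minus delimiter and slicing with a single left-to-right pass that accumulates a term buffer and flushes it at each sign delimiter.
import Mathlib
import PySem

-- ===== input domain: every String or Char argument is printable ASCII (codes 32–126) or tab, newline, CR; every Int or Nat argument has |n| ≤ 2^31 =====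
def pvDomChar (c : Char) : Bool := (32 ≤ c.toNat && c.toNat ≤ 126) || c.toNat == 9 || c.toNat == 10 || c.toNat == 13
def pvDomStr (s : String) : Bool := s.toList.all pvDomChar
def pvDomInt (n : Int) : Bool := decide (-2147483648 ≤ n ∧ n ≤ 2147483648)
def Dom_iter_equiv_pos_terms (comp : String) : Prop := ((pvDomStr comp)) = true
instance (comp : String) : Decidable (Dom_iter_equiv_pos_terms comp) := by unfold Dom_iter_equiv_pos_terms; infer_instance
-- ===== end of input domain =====

-- B replaces A's repeated find/slice scanning with one left-to-right pass accumulating a term buffer (simpler, one pass).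

-- ===== PORT A =====
-- A's while loop, transliterated over the code-point list; fuel = length + 1 (each
-- iteration consumes at least one character, so the fuel never runs out on the ports' calls).
def iterAF : Nat → List Char → List (Int × String)
  | 0, _ => []
  | f + 1, cs =>
    match cs with
    | [] => []                                    -- while len(comp) > 0
    | c :: cs' =>
      let sign : Int := 1 - 2 * (if c = '-' then 1 else 0)
      let rest := if c = '+' ∨ c = '-' then cs' else c :: cs'
      let pos_p := PySem.Chars.find rest ['+']
      let pos_m := PySem.Chars.find rest ['-']
      let pos_p := if pos_p < 0 then pos_p + rest.length + 1 else pos_p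
      let pos_m := if pos_m < 0 then pos_m + rest.length + 1 else pos_m
      let e := min pos_p pos_m
      (sign, String.ofList (PySem.Chars.slice rest none (some e))) ::
        iterAF f (PySem.Chars.slice rest (some e) none)

def iter_equiv_pos_terms (comp : String) : List (Int × String) :=
  iterAF (comp.toList.length + 1) comp.toList

-- ===== PORT B =====
-- B's for loop: sign, then buffer accumulation, flush on '+'/'-' and at the end.
def iterBLoop : List Char → Int → List Char → List (Int × String)
  | [], sign, buf => [(sign, String.ofList buf)]
  | c :: rest, sign, buf =>
    if c = '+' ∨ c = '-' then
      (sign, String.ofList buf) :: iterBLoop rest (if c = '-' then -1 else 1) []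
    else
      iterBLoop rest sign (buf ++ [c])

def iter_equiv_pos_terms_alt (comp : String) : List (Int × String) :=
  match comp.toList with
  | [] => []
  | c :: rest =>
    iterBLoop (if c = '+' ∨ c = '-' then rest else c :: rest)
      (if c = '-' then -1 else 1) []

-- ===== PRECONDITION & SPEC =====
def Spec_iter_equiv_pos_terms (comp : String) (out : List (Int × String)) : Prop := out = iter_equiv_pos_terms_alt comp
instance (comp : String) (out : List (Int × String)) : Decidable (Spec_iter_equiv_pos_terms comp out) := by unfold Spec_iter_equiv_pos_terms; infer_instance

-- ===== CLAIM (what is proved, stated in full; the proofs are below) =====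
def Claim_equal_iter_equiv_pos_terms : Prop := ∀ (comp : String), Dom_iter_equiv_pos_terms comp → Spec_iter_equiv_pos_terms comp (iter_equiv_pos_terms comp)

-- ===== LEMMAS AND PROOFS =====

-- first index of a '+' or '-' in the remaining characters, or the length if none
def eNat (s : List Char) : Nat := (s.findIdx? (fun c => c = '+' || c = '-')).getD s.length

theorem eNat_nil : eNat [] = 0 := by simp [eNat]

theorem eNat_cons (c : Char) (s : List Char) :
    eNat (c :: s) = if c = '+' ∨ c = '-' then 0 else eNat s + 1 := by
  by_cases h : c = '+' ∨ c = '-' <;>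
    simp [eNat, List.findIdx?_cons, h]

theorem singleton_prefix_drop (s : List Char) (k : Nat) (c : Char) (hk : k < s.length) :
    [c] <+: s.drop k ↔ s[k] = c := by
  rw [List.drop_eq_getElem_cons hk]
  constructor
  · intro h; exact (List.cons_prefix_cons.mp h).1.symm
  · rintro rfl; exact ⟨_, rfl⟩

theorem find_singleton (s : List Char) (c : Char) :
    PySem.Chars.find s [c] =
      match s.findIdx? (· == c) with
      | some i => (i : Int)
      | none => -1 := by
  cases h : s.findIdx? (· == c) with
  | none =>
    rw [PySem.Chars.find_eq_neg_one_iff]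
    intro hinf
    have hc : c ∈ s := hinf.subset (List.mem_singleton_self c)
    obtain ⟨i, hi, hget⟩ := List.mem_iff_getElem.mp hc
    have := List.findIdx?_eq_none_iff.mp h s[i] (List.getElem_mem hi)
    simp [hget] at this
  | some i =>
    obtain ⟨hi, hgi, hmin⟩ := List.findIdx?_eq_some_iff_getElem.mp h
    have hgi' : s[i] = c := by simpa using hgi
    have hinf : [c] <:+: s :=
      ((singleton_prefix_drop s i c hi).mpr hgi').isInfix.trans (s.drop_suffix i).isInfix
    have h0 : 0 ≤ PySem.Chars.find s [c] := (PySem.Chars.find_nonneg_iff s [c]).mpr hinf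
    obtain ⟨hpre, hlt⟩ := PySem.Chars.find_spec h0
    have hlen : PySem.Chars.find s [c] ≤ s.length := PySem.Chars.find_le_length s [c]
    set k := (PySem.Chars.find s [c]).toNat with hkdef
    have hk : k < s.length := by
      rcases Nat.lt_or_ge k s.length with h' | h'
      · exact h'
      · exfalso
        have : s.drop k = [] := List.drop_eq_nil_of_le h'
        rw [this] at hpre
        exact absurd (List.IsPrefix.length_le hpre) (by simp)
    have hsk : s[k] = c := (singleton_prefix_drop s k c hk).mp hpre
    -- i ≤ k by findIdx? minimality, k ≤ i by find_spec minimality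
    have hik : ¬ i < k := fun hlt' => (hlt i hlt') ((singleton_prefix_drop s i c hi).mpr hgi')
    have hki : ¬ k < i := fun hlt' => by
      have := hmin k hlt'
      simp [hsk] at this
    have hik2 : i = k := by omega
    show PySem.Chars.find s [c] = (i : Int)
    omega

theorem corrected_find (s : List Char) (c : Char) :
    (if PySem.Chars.find s [c] < 0 then PySem.Chars.find s [c] + s.length + 1
     else PySem.Chars.find s [c]) = (((s.findIdx? (· == c)).getD s.length : Nat) : Int) := by
  rw [find_singleton]
  cases h : s.findIdx? (· == c) with
  | none => simp
  | some i => simp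

theorem getD_min (s : List Char) :
    min ((s.findIdx? (· == '+')).getD s.length) ((s.findIdx? (· == '-')).getD s.length)
      = eNat s := by
  induction s with
  | nil => simp [eNat]
  | cons c rest ih =>
    rw [eNat_cons]
    rcases eq_or_ne c '+' with rfl | hp
    · simp [List.findIdx?_cons]
    rcases eq_or_ne c '-' with rfl | hm
    · simp [List.findIdx?_cons]
    · have hpm : ¬ (c = '+' ∨ c = '-') := by tauto
      rw [if_neg hpm]
      simp only [List.findIdx?_cons, List.length_cons]
      cases h1 : rest.findIdx? (· == '+') <;> cases h2 : rest.findIdx? (· == '-') <;>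
        rw [h1, h2] at ih <;> simp [hp, hm] at ih ⊢ <;> omega

-- unfolding of one A iteration, with the slice bounds resolved to take/drop at eNat
theorem iterAF_succ_cons (f : Nat) (c : Char) (cs : List Char) :
    iterAF (f + 1) (c :: cs) =
      (if c = '-' then (-1 : Int) else 1,
        String.ofList ((if c = '+' ∨ c = '-' then cs else c :: cs).take
          (eNat (if c = '+' ∨ c = '-' then cs else c :: cs)))) ::
        iterAF f ((if c = '+' ∨ c = '-' then cs else c :: cs).drop
          (eNat (if c = '+' ∨ c = '-' then cs else c :: cs))) := by
  set rest := if c = '+' ∨ c = '-' then cs else c :: cs with hrest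
  have he : min
      (if PySem.Chars.find rest ['+'] < 0 then PySem.Chars.find rest ['+'] + rest.length + 1
       else PySem.Chars.find rest ['+'])
      (if PySem.Chars.find rest ['-'] < 0 then PySem.Chars.find rest ['-'] + rest.length + 1
       else PySem.Chars.find rest ['-']) = ((eNat rest : Nat) : Int) := by
    rw [corrected_find, corrected_find, ← Nat.cast_min, getD_min]
  have hsign : (1 - 2 * (if c = '-' then (1 : Int) else 0)) = (if c = '-' then (-1 : Int) else 1) := by
    by_cases h : c = '-' <;> simp [h]
  have step : iterAF (f + 1) (c :: cs) =
      (1 - 2 * (if c = '-' then (1 : Int) else 0),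
        String.ofList (PySem.Chars.slice rest none (some (min
          (if PySem.Chars.find rest ['+'] < 0 then PySem.Chars.find rest ['+'] + rest.length + 1
           else PySem.Chars.find rest ['+'])
          (if PySem.Chars.find rest ['-'] < 0 then PySem.Chars.find rest ['-'] + rest.length + 1
           else PySem.Chars.find rest ['-']))))) ::
        iterAF f (PySem.Chars.slice rest (some (min
          (if PySem.Chars.find rest ['+'] < 0 then PySem.Chars.find rest ['+'] + rest.length + 1
           else PySem.Chars.find rest ['+'])
          (if PySem.Chars.find rest ['-'] < 0 then PySem.Chars.find rest ['-'] + rest.length + 1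
           else PySem.Chars.find rest ['-']))) none) := rfl
  rw [step, he, hsign, PySem.Chars.slice_eq_listSlice, PySem.Chars.slice_eq_listSlice,
    PySem.List.slice_to_natCast, PySem.List.slice_from_natCast]

theorem iterAF_nil (f : Nat) : iterAF f [] = [] := by cases f <;> rfl

theorem main_lemma (rest : List Char) : ∀ (fuel : Nat), rest.length ≤ fuel → ∀ (sign : Int) (buf : List Char),
    iterBLoop rest sign buf =
      (sign, String.ofList (buf ++ rest.take (eNat rest))) :: iterAF fuel (rest.drop (eNat rest)) := by
  induction rest with
  | nil =>
    intro fuel _ sign buf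
    simp [iterBLoop, eNat_nil, iterAF_nil]
  | cons c rs ih =>
    intro fuel hfuel sign buf
    by_cases hc : c = '+' ∨ c = '-'
    · obtain ⟨f, rfl⟩ : ∃ f, fuel = f + 1 := ⟨fuel - 1, by simp at hfuel; omega⟩
      rw [eNat_cons, if_pos hc]
      simp only [List.take_zero, List.drop_zero, List.append_nil]
      rw [iterAF_succ_cons, if_pos hc]
      simp only [iterBLoop, if_pos hc]
      rw [ih f (by simp at hfuel; omega)]
      simp
    · rw [eNat_cons, if_neg hc]
      rw [iterBLoop, if_neg hc, ih fuel (by simp at hfuel; omega)]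
      simp

-- ===== VERDICT (by name: the statement is the Claim_ definition above) =====
theorem iter_equiv_pos_terms_spec : Claim_equal_iter_equiv_pos_terms := by
  intro comp _
  unfold Spec_iter_equiv_pos_terms iter_equiv_pos_terms iter_equiv_pos_terms_alt
  cases h : comp.toList with
  | nil => simp [iterAF_nil]
  | cons c rs =>
    simp only [List.length_cons]
    rw [iterAF_succ_cons]
    by_cases hc : c = '+' ∨ c = '-'
    · simp only [if_pos hc]
      rw [main_lemma rs (rs.length + 1) (by omega) _ []]
      simp
    · simp only [if_neg hc]
      rw [eNat_cons, if_neg hc]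
      simp only [List.take_succ_cons, List.drop_succ_cons, iterBLoop, if_neg hc]
      rw [List.nil_append, main_lemma rs (rs.length + 1) (by omega) _ [c]]
      simp
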